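-- pv_equiv track=rewrite | github.com/jldana/judging-a-movie-by-its-cover | src/model_aide.py | class_handler
-- ===== SOURCE A (Python) =====
-- def class_handler(base_class):
--     # Remove IMAX - not a genre
--     n_l = [[x for x in genre if x != 'IMAX'] for genre in base_class]
--     # Remove crime - not a genre
--     nl1 = [['Action' if x == 'Crime' else x for x in genre ] for genre in n_l]
--     # Remove crime - not a genre
--     nl1_1 = [['Action'  if x == 'War' else x for x in genre] for genre in nl1]
--     # Change no genre to UNKNOWN - easier to type...
--     n_l2 = [[r if r != '(no genres listed)' else 'UNKNOWN' for r in genre] for genre in nl1_1]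
--     # If children was tagged called it a children's movie.
--     nl3 = [['Children'] if 'Children' in genre else genre for genre in n_l2]
--     # Remove War Tag. War movies are action or drama movies that happen in the scetting of war.
--     #nl4 = [[x for x in genre if x != 'War' and len(genre) > 1] for genre in nl3]
--     # It's a comedy if comedy comes up in titles with more than 2 genres.
--     nl5 = [['Comedy'] if 'Comedy' in genre and len(genre) > 2 else genre for genre in nl3]
--     # It's a comedy if it has 2 genres and the other isn't Drama. Comedy Drama is its own category.
--     nl5_5 = [['Comedy'] if 'Comedy' in genre and 'Drama' not in genre else genre for genre in nl5]
--     # It's an Action Thriller if both Action and Thriller are present.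
--     nl6 = [['Action', 'Thriller'] if 'Thriller' in genre and 'Action' in genre else genre for genre in nl5_5]
--     # It's action Adventure if both are in genres.
--     nl6_6 = [['Action', 'Adventure'] if 'Adventure' in genre and 'Action' in genre else genre for genre in nl6]
--     # Drama if Drama and Romance exist.
--     nl7 = [['Drama'] if 'Drama' in genre and 'Romance' in genre else genre for genre in nl6_6]
--     # # Crime movies are not a genre.
--     # nl8 = [[x for x in genre if x != 'Crime' and len(genre) > 1] for genre in nl7]
--     # Romantic Comedies are comedies.
--     nl9 = [['Comedy'] if 'Comedy' in genre and 'Romance' in genre else genre for genre in nl7]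
--     # Musicals are musicals - Rent vs. Cats vs. Oklahoma
--     nl10 = [['Musical'] if 'Musical' in genre else genre for genre in nl9]
--     #Animated Movies are animated. Most seem to be childrens movies, but some are for adults...
--     nl11 = [['Animation'] if 'Animation' in genre else genre for genre in nl10]
--     # Documentaries are Documentaries.
--     nl12 = [['Documentary'] if 'Documentary' in genre else genre for genre in nl11]
--     # Thriller is the most prominent of the subgenres.
--     nl13 = [['Thriller'] if 'Thriller' in genre and 'Action' not in genre else genre for genre in nl12]
--     # Horror tags indicate some level of horror.
--     nl14 = [['Horror'] if 'Horror' in genre else genre for genre in nl13]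
--     # If there's only two subs Sci-Fi wins.
--     nl15 = [['Sci-Fi'] if 'Sci-Fi' in genre and len(genre) > 2 else genre for genre in nl14]
--     # Westerns share a certain je ne sais qua?
--     nl16 = [['Western'] if 'Western' in genre else genre for genre in nl15]
--     # Films-noir are of an ilk.
--     nl17 = [['Film-Noir'] if 'Film-Noir' in genre else genre for genre in nl16]
--     #Drama is the dominant class in Adventrue and Action Dramas.
--     nl18 = [['Drama'] if 'Drama' in genre and 'Action' in genre else genre for genre in nl17]
--     #Drama is the dominant class in Adventrue and Action Dramas.
--     nl19 = [['Drama'] if 'Drama' in genre and 'Adventure' in genre else genre for genre in nl18]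
--     # Mystery is a subclass.
--     for i in nl19:
--         if len(i) > 1:
--             if 'Mystery' in i:
--                 i = i.remove('Mystery')
--     #Fantasy is a subclass
--     for i in nl19:
--         if len(i) > 1:
--             if 'Fantasy' in i:
--                 i = i.remove('Fantasy')
--
--     # At this stage romance is a subclass.
--     for i in nl19:
--         if len(i) > 1:
--             if 'Romance' in i:
--                 i = i.remove('Romance')
--     # At this stage sci-fi is also a subclass.
--     for i in nl19:
--         if len(i) > 1:
--             if 'Sci-Fi' in i:
--                 i = i.remove('Sci-Fi')
--     for i in nl19:
--         if len(i) == 2: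
--             if i[1] == 'Action':
--                 i.pop(1)
--     for i in nl19:
--         if len(i) > 1:
--             if 'Action' in i:
--                 if 'Thriller' in i:
--                     i = i.remove('Thriller')
--     classes = nl19
--     return classes
-- ===== SOURCE B (Python) =====
-- # B computes each movie's final class directly: the collapse cascade is constant-folded
-- # into a first-match dispatch (once a rule fires, the rest of the pipeline is input-
-- # independent, so each trigger's final outcome is precomputed), with the subclass
-- # removals only in the no-rule fallback; simpler, no staged rewriting.
--
-- _SUB = {'Crime': 'Action', 'War': 'Action', '(no genres listed)': 'UNKNOWN'}
--
--
-- def _classify(genre):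
--     g = [_SUB.get(x, x) for x in genre if x != 'IMAX']
--     if 'Children' in g:
--         return ['Children']
--     if 'Comedy' in g and len(g) > 2:
--         return ['Comedy']
--     if 'Comedy' in g and 'Drama' not in g:
--         return ['Comedy']
--     if 'Thriller' in g and 'Action' in g:
--         return ['Action']
--     if 'Adventure' in g and 'Action' in g:
--         return ['Action', 'Adventure']
--     if 'Drama' in g and 'Romance' in g:
--         return ['Drama']
--     if 'Comedy' in g and 'Romance' in g:
--         return ['Comedy']
--     if 'Musical' in g:
--         return ['Musical']
--     if 'Animation' in g:
--         return ['Animation']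
--     if 'Documentary' in g:
--         return ['Documentary']
--     if 'Thriller' in g:
--         return ['Thriller']
--     if 'Horror' in g:
--         return ['Horror']
--     if 'Sci-Fi' in g and len(g) > 2:
--         return ['Sci-Fi']
--     if 'Western' in g:
--         return ['Western']
--     if 'Film-Noir' in g:
--         return ['Film-Noir']
--     if 'Drama' in g and ('Action' in g or 'Adventure' in g):
--         return ['Drama']
--     # no collapse rule fires: strip the subclass tags
--     for tag in ('Mystery', 'Fantasy', 'Romance', 'Sci-Fi'):
--         if len(g) > 1 and tag in g:
--             g.remove(tag)
--     if len(g) == 2 and g[1] == 'Action':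
--         g.pop()
--     return g
--
--
-- def class_handler(base_class):
--     return [_classify(genre) for genre in base_class]
-- ===== Notes on version B (the rewrite author's own statement) =====
-- stated objective: simpler
-- what changed: A rewrites the whole list through ~19 staged passes plus six mutation loops; B constant-folds the cascade: since every firing rule replaces the list by a fixed literal whose remaining pipeline is input-independent, B classifies each movie by a single first-match dispatch over precomputed final outcomes (merging redundant rules, e.g. Thriller&Action already yields ['Action'] directly and the two Drama rules merge), with the subclass removals only in the no-match fallback.
import Mathlib
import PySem

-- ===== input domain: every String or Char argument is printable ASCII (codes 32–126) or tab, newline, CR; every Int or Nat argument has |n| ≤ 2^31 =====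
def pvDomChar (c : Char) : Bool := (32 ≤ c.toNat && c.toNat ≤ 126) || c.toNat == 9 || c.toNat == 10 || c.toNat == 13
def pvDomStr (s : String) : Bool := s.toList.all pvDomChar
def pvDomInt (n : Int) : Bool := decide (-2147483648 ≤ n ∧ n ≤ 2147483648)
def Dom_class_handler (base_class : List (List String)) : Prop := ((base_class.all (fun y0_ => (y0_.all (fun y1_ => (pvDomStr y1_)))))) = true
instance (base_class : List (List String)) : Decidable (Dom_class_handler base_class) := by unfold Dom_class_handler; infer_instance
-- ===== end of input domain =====

-- B constant-folds A's rule cascade into a first-match dispatch over precomputed final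
-- outcomes (simpler decomposition); A never mutates its argument (pass 1 copies every
-- sublist), so return-value equivalence is full equivalence.

-- ===== PORT A =====
-- Each comprehension / mutation loop of A is one list pass; its per-element body is a named
-- helper (aStage*/aColl*/aSub*/aPop/aFin), transcribed branch for branch from the Python.
def aStage1 (genre : List String) : List String := genre.filter (fun x => x != "IMAX")
def aStage2 (genre : List String) : List String := genre.map (fun x => if x = "Crime" then "Action" else x)
def aStage3 (genre : List String) : List String := genre.map (fun x => if x = "War" then "Action" else x)
def aStage4 (genre : List String) : List String := genre.map (fun r => if r ≠ "(no genres listed)" then r else "UNKNOWN")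
def aColl1 (genre : List String) : List String := if "Children" ∈ genre then ["Children"] else genre
def aColl2 (genre : List String) : List String := if "Comedy" ∈ genre ∧ genre.length > 2 then ["Comedy"] else genre
def aColl3 (genre : List String) : List String := if "Comedy" ∈ genre ∧ "Drama" ∉ genre then ["Comedy"] else genre
def aColl4 (genre : List String) : List String := if "Thriller" ∈ genre ∧ "Action" ∈ genre then ["Action", "Thriller"] else genre
def aColl5 (genre : List String) : List String := if "Adventure" ∈ genre ∧ "Action" ∈ genre then ["Action", "Adventure"] else genre
def aColl6 (genre : List String) : List String := if "Drama" ∈ genre ∧ "Romance" ∈ genre then ["Drama"] else genre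
def aColl7 (genre : List String) : List String := if "Comedy" ∈ genre ∧ "Romance" ∈ genre then ["Comedy"] else genre
def aColl8 (genre : List String) : List String := if "Musical" ∈ genre then ["Musical"] else genre
def aColl9 (genre : List String) : List String := if "Animation" ∈ genre then ["Animation"] else genre
def aColl10 (genre : List String) : List String := if "Documentary" ∈ genre then ["Documentary"] else genre
def aColl11 (genre : List String) : List String := if "Thriller" ∈ genre ∧ "Action" ∉ genre then ["Thriller"] else genre
def aColl12 (genre : List String) : List String := if "Horror" ∈ genre then ["Horror"] else genre
def aColl13 (genre : List String) : List String := if "Sci-Fi" ∈ genre ∧ genre.length > 2 then ["Sci-Fi"] else genre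
def aColl14 (genre : List String) : List String := if "Western" ∈ genre then ["Western"] else genre
def aColl15 (genre : List String) : List String := if "Film-Noir" ∈ genre then ["Film-Noir"] else genre
def aColl16 (genre : List String) : List String := if "Drama" ∈ genre ∧ "Action" ∈ genre then ["Drama"] else genre
def aColl17 (genre : List String) : List String := if "Drama" ∈ genre ∧ "Adventure" ∈ genre then ["Drama"] else genre
-- in-place `for` loops: i.remove(tag) deletes the first occurrence = List.erase
def aSub1 (i : List String) : List String := if i.length > 1 then (if "Mystery" ∈ i then i.erase "Mystery" else i) else i
def aSub2 (i : List String) : List String := if i.length > 1 then (if "Fantasy" ∈ i then i.erase "Fantasy" else i) else i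
def aSub3 (i : List String) : List String := if i.length > 1 then (if "Romance" ∈ i then i.erase "Romance" else i) else i
def aSub4 (i : List String) : List String := if i.length > 1 then (if "Sci-Fi" ∈ i then i.erase "Sci-Fi" else i) else i
-- i.pop(1) on a 2-element list = List.eraseIdx 1; i[1] is safe under len(i) == 2
def aPop (i : List String) : List String := if i.length = 2 then (if i.getD 1 "" = "Action" then i.eraseIdx 1 else i) else i
def aFin (i : List String) : List String := if i.length > 1 then (if "Action" ∈ i then (if "Thriller" ∈ i then i.erase "Thriller" else i) else i) else i

def class_handler (base_class : List (List String)) : List (List String) :=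
  let n_l := base_class.map aStage1
  let nl1 := n_l.map aStage2
  let nl1_1 := nl1.map aStage3
  let n_l2 := nl1_1.map aStage4
  let nl3 := n_l2.map aColl1
  let nl5 := nl3.map aColl2
  let nl5_5 := nl5.map aColl3
  let nl6 := nl5_5.map aColl4
  let nl6_6 := nl6.map aColl5
  let nl7 := nl6_6.map aColl6
  let nl9 := nl7.map aColl7
  let nl10 := nl9.map aColl8
  let nl11 := nl10.map aColl9
  let nl12 := nl11.map aColl10
  let nl13 := nl12.map aColl11
  let nl14 := nl13.map aColl12
  let nl15 := nl14.map aColl13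
  let nl16 := nl15.map aColl14
  let nl17 := nl16.map aColl15
  let nl18 := nl17.map aColl16
  let nl19 := nl18.map aColl17
  let m1 := nl19.map aSub1
  let m2 := m1.map aSub2
  let m3 := m2.map aSub3
  let m4 := m3.map aSub4
  let m5 := m4.map aPop
  let m6 := m5.map aFin
  m6

-- ===== PORT B =====
-- Source B's _SUB translation dict (dict.get(x, x) = (get? …).getD x)
def bSub : PySem.Dict String String :=
  PySem.Dict.ofList [("Crime", "Action"), ("War", "Action"), ("(no genres listed)", "UNKNOWN")]

-- Source B's _classify: normalize once, then first-match dispatch on precomputed outcomes;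
-- subclass removals (a fold over the four tags, then the pop) only in the fallback.
def bClassify (genre : List String) : List String :=
  let g := (genre.filter (fun x => x != "IMAX")).map (fun x => ((PySem.Dict.get? bSub x).getD x))
  if "Children" ∈ g then ["Children"]
  else if "Comedy" ∈ g ∧ g.length > 2 then ["Comedy"]
  else if "Comedy" ∈ g ∧ "Drama" ∉ g then ["Comedy"]
  else if "Thriller" ∈ g ∧ "Action" ∈ g then ["Action"]
  else if "Adventure" ∈ g ∧ "Action" ∈ g then ["Action", "Adventure"]
  else if "Drama" ∈ g ∧ "Romance" ∈ g then ["Drama"]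
  else if "Comedy" ∈ g ∧ "Romance" ∈ g then ["Comedy"]
  else if "Musical" ∈ g then ["Musical"]
  else if "Animation" ∈ g then ["Animation"]
  else if "Documentary" ∈ g then ["Documentary"]
  else if "Thriller" ∈ g then ["Thriller"]
  else if "Horror" ∈ g then ["Horror"]
  else if "Sci-Fi" ∈ g ∧ g.length > 2 then ["Sci-Fi"]
  else if "Western" ∈ g then ["Western"]
  else if "Film-Noir" ∈ g then ["Film-Noir"]
  else if "Drama" ∈ g ∧ ("Action" ∈ g ∨ "Adventure" ∈ g) then ["Drama"]
  else
    let g1 := ["Mystery", "Fantasy", "Romance", "Sci-Fi"].foldl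
        (fun g tag => if g.length > 1 ∧ tag ∈ g then g.erase tag else g) g
    -- g.pop() removes the last element; under len == 2 that is dropLast
    if g1.length = 2 ∧ g1.getD 1 "" = "Action" then g1.dropLast else g1

def class_handler_alt (base_class : List (List String)) : List (List String) :=
  base_class.map bClassify

-- ===== PRECONDITION & SPEC =====
def Spec_class_handler (base_class : List (List String)) (out : List (List String)) : Prop := out = class_handler_alt base_class
instance (base_class : List (List String)) (out : List (List String)) : Decidable (Spec_class_handler base_class out) := by unfold Spec_class_handler; infer_instance

-- ===== CLAIM (what is proved, stated in full; the proofs are below) =====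
def Claim_equal_class_handler : Prop := ∀ (base_class : List (List String)), Dom_class_handler base_class → Spec_class_handler base_class (class_handler base_class)

-- ===== LEMMAS AND PROOFS =====

-- A's four normalization passes over one sublist equal B's single filter+map.
theorem pvNorm_eq (g : List String) :
    aStage4 (aStage3 (aStage2 (aStage1 g)))
      = (g.filter (fun x => x != "IMAX")).map (fun x => ((PySem.Dict.get? bSub x).getD x)) := by
  simp only [aStage1, aStage2, aStage3, aStage4, List.map_map]
  refine List.map_congr_left (fun x _ => ?_)
  have hb : bSub = PySem.Dict.mk [("Crime", "Action"), ("War", "Action"), ("(no genres listed)", "UNKNOWN")] := by decide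
  by_cases h1 : x = "Crime"
  · subst h1; decide
  by_cases h2 : x = "War"
  · subst h2; decide
  by_cases h3 : x = "(no genres listed)"
  · subst h3; decide
  have e1 : ("Crime" == x) = false := by simpa using fun h => h1 h.symm
  have e2 : ("War" == x) = false := by simpa using fun h => h2 h.symm
  have e3 : ("(no genres listed)" == x) = false := by simpa using fun h => h3 h.symm
  simp [h1, h2, h3, hb, e1, e2, e3, PySem.Dict.get?]

-- Proof-only name for A's whole per-movie pipeline after normalization.
def aChain (t : List String) : List String :=
  aFin (aPop (aSub4 (aSub3 (aSub2 (aSub1 (aColl17 (aColl16 (aColl15 (aColl14 (aColl13 (aColl12 (aColl11 (aColl10 (aColl9 (aColl8 (aColl7 (aColl6 (aColl5 (aColl4 (aColl3 (aColl2 (aColl1 t))))))))))))))))))))))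

-- Proof-only name for B's dispatch after normalization.
def bCore (g : List String) : List String :=
  if "Children" ∈ g then ["Children"]
  else if "Comedy" ∈ g ∧ g.length > 2 then ["Comedy"]
  else if "Comedy" ∈ g ∧ "Drama" ∉ g then ["Comedy"]
  else if "Thriller" ∈ g ∧ "Action" ∈ g then ["Action"]
  else if "Adventure" ∈ g ∧ "Action" ∈ g then ["Action", "Adventure"]
  else if "Drama" ∈ g ∧ "Romance" ∈ g then ["Drama"]
  else if "Comedy" ∈ g ∧ "Romance" ∈ g then ["Comedy"]
  else if "Musical" ∈ g then ["Musical"]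
  else if "Animation" ∈ g then ["Animation"]
  else if "Documentary" ∈ g then ["Documentary"]
  else if "Thriller" ∈ g then ["Thriller"]
  else if "Horror" ∈ g then ["Horror"]
  else if "Sci-Fi" ∈ g ∧ g.length > 2 then ["Sci-Fi"]
  else if "Western" ∈ g then ["Western"]
  else if "Film-Noir" ∈ g then ["Film-Noir"]
  else if "Drama" ∈ g ∧ ("Action" ∈ g ∨ "Adventure" ∈ g) then ["Drama"]
  else
    let g1 := ["Mystery", "Fantasy", "Romance", "Sci-Fi"].foldl
        (fun g tag => if g.length > 1 ∧ tag ∈ g then g.erase tag else g) g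
    if g1.length = 2 ∧ g1.getD 1 "" = "Action" then g1.dropLast else g1

theorem bClassify_eq (genre : List String) :
    bClassify genre = bCore ((genre.filter (fun x => x != "IMAX")).map (fun x => ((PySem.Dict.get? bSub x).getD x))) := rfl

theorem aSub1_eq (t : List String) :
    aSub1 t = if t.length > 1 ∧ "Mystery" ∈ t then t.erase "Mystery" else t := by
  unfold aSub1; by_cases h1 : t.length > 1 <;> by_cases h2 : "Mystery" ∈ t <;> simp [h1, h2]
theorem aSub2_eq (t : List String) :
    aSub2 t = if t.length > 1 ∧ "Fantasy" ∈ t then t.erase "Fantasy" else t := by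
  unfold aSub2; by_cases h1 : t.length > 1 <;> by_cases h2 : "Fantasy" ∈ t <;> simp [h1, h2]
theorem aSub3_eq (t : List String) :
    aSub3 t = if t.length > 1 ∧ "Romance" ∈ t then t.erase "Romance" else t := by
  unfold aSub3; by_cases h1 : t.length > 1 <;> by_cases h2 : "Romance" ∈ t <;> simp [h1, h2]
theorem aSub4_eq (t : List String) :
    aSub4 t = if t.length > 1 ∧ "Sci-Fi" ∈ t then t.erase "Sci-Fi" else t := by
  unfold aSub4; by_cases h1 : t.length > 1 <;> by_cases h2 : "Sci-Fi" ∈ t <;> simp [h1, h2]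

-- B's removal fold equals A's four removal passes, from any start list.
theorem remFold (t : List String) :
    (["Mystery", "Fantasy", "Romance", "Sci-Fi"] : List String).foldl
        (fun g tag => if g.length > 1 ∧ tag ∈ g then g.erase tag else g) t
      = aSub4 (aSub3 (aSub2 (aSub1 t))) := by
  simp only [List.foldl_cons, List.foldl_nil, aSub1_eq, aSub2_eq, aSub3_eq, aSub4_eq]

-- erase/eraseIdx do not introduce elements.
theorem not_mem_erase_of_not_mem (s x : String) (t : List String) (h : s ∉ t) : s ∉ t.erase x :=
  fun hm => h ((List.erase_sublist).mem hm)
theorem not_mem_eraseIdx_of_not_mem (s : String) (n : ℕ) (t : List String) (h : s ∉ t) : s ∉ t.eraseIdx n :=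
  fun hm => h ((List.eraseIdx_sublist t n).mem hm)

-- A per-movie pipeline = B per-movie dispatch (the heart of the claim): first-match case split.
theorem core_eq (t : List String) : aChain t = bCore t := by
  unfold aChain bCore
  by_cases h1 : "Children" ∈ t
  · rw [show aColl1 t = ["Children"] by simp [aColl1, h1]]
    simp only [if_pos h1]
    decide
  rw [show aColl1 t = t by simp [aColl1, h1]]
  by_cases h2 : "Comedy" ∈ t ∧ t.length > 2
  · rw [show aColl2 t = ["Comedy"] by simp [aColl2, h2]]
    simp only [if_neg h1, if_pos h2]
    decide
  rw [show aColl2 t = t by simp [aColl2, h2]]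
  by_cases h3 : "Comedy" ∈ t ∧ "Drama" ∉ t
  · rw [show aColl3 t = ["Comedy"] by simp [aColl3, h3]]
    simp only [if_neg h1, if_neg h2, if_pos h3]
    decide
  rw [show aColl3 t = t by simp [aColl3, h3]]
  by_cases h4 : "Thriller" ∈ t ∧ "Action" ∈ t
  · rw [show aColl4 t = ["Action", "Thriller"] by simp [aColl4, h4]]
    simp only [if_neg h1, if_neg h2, if_neg h3, if_pos h4]
    decide
  rw [show aColl4 t = t by simp [aColl4, h4]]
  by_cases h5 : "Adventure" ∈ t ∧ "Action" ∈ t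
  · rw [show aColl5 t = ["Action", "Adventure"] by simp [aColl5, h5]]
    simp only [if_neg h1, if_neg h2, if_neg h3, if_neg h4, if_pos h5]
    decide
  rw [show aColl5 t = t by simp [aColl5, h5]]
  by_cases h6 : "Drama" ∈ t ∧ "Romance" ∈ t
  · rw [show aColl6 t = ["Drama"] by simp [aColl6, h6]]
    simp only [if_neg h1, if_neg h2, if_neg h3, if_neg h4, if_neg h5, if_pos h6]
    decide
  rw [show aColl6 t = t by simp [aColl6, h6]]
  by_cases h7 : "Comedy" ∈ t ∧ "Romance" ∈ t
  · rw [show aColl7 t = ["Comedy"] by simp [aColl7, h7]]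
    simp only [if_neg h1, if_neg h2, if_neg h3, if_neg h4, if_neg h5, if_neg h6, if_pos h7]
    decide
  rw [show aColl7 t = t by simp [aColl7, h7]]
  by_cases h8 : "Musical" ∈ t
  · rw [show aColl8 t = ["Musical"] by simp [aColl8, h8]]
    simp only [if_neg h1, if_neg h2, if_neg h3, if_neg h4, if_neg h5, if_neg h6, if_neg h7, if_pos h8]
    decide
  rw [show aColl8 t = t by simp [aColl8, h8]]
  by_cases h9 : "Animation" ∈ t
  · rw [show aColl9 t = ["Animation"] by simp [aColl9, h9]]
    simp only [if_neg h1, if_neg h2, if_neg h3, if_neg h4, if_neg h5, if_neg h6, if_neg h7, if_neg h8, if_pos h9]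
    decide
  rw [show aColl9 t = t by simp [aColl9, h9]]
  by_cases h10 : "Documentary" ∈ t
  · rw [show aColl10 t = ["Documentary"] by simp [aColl10, h10]]
    simp only [if_neg h1, if_neg h2, if_neg h3, if_neg h4, if_neg h5, if_neg h6, if_neg h7, if_neg h8, if_neg h9, if_pos h10]
    decide
  rw [show aColl10 t = t by simp [aColl10, h10]]
  by_cases h11 : "Thriller" ∈ t
  · have hna : "Action" ∉ t := fun ha => h4 ⟨h11, ha⟩
    rw [show aColl11 t = ["Thriller"] by simp [aColl11, h11, hna]]
    simp only [if_neg h1, if_neg h2, if_neg h3, if_neg h4, if_neg h5, if_neg h6, if_neg h7, if_neg h8, if_neg h9, if_neg h10, if_pos h11]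
    decide
  rw [show aColl11 t = t by simp [aColl11, h11]]
  by_cases h12 : "Horror" ∈ t
  · rw [show aColl12 t = ["Horror"] by simp [aColl12, h12]]
    simp only [if_neg h1, if_neg h2, if_neg h3, if_neg h4, if_neg h5, if_neg h6, if_neg h7, if_neg h8, if_neg h9, if_neg h10, if_neg h11, if_pos h12]
    decide
  rw [show aColl12 t = t by simp [aColl12, h12]]
  by_cases h13 : "Sci-Fi" ∈ t ∧ t.length > 2
  · rw [show aColl13 t = ["Sci-Fi"] by simp [aColl13, h13]]
    simp only [if_neg h1, if_neg h2, if_neg h3, if_neg h4, if_neg h5, if_neg h6, if_neg h7, if_neg h8, if_neg h9, if_neg h10, if_neg h11, if_neg h12, if_pos h13]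
    decide
  rw [show aColl13 t = t by simp [aColl13, h13]]
  by_cases h14 : "Western" ∈ t
  · rw [show aColl14 t = ["Western"] by simp [aColl14, h14]]
    simp only [if_neg h1, if_neg h2, if_neg h3, if_neg h4, if_neg h5, if_neg h6, if_neg h7, if_neg h8, if_neg h9, if_neg h10, if_neg h11, if_neg h12, if_neg h13, if_pos h14]
    decide
  rw [show aColl14 t = t by simp [aColl14, h14]]
  by_cases h15 : "Film-Noir" ∈ t
  · rw [show aColl15 t = ["Film-Noir"] by simp [aColl15, h15]]
    simp only [if_neg h1, if_neg h2, if_neg h3, if_neg h4, if_neg h5, if_neg h6, if_neg h7, if_neg h8, if_neg h9, if_neg h10, if_neg h11, if_neg h12, if_neg h13, if_neg h14, if_pos h15]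
    decide
  rw [show aColl15 t = t by simp [aColl15, h15]]
  by_cases h16 : "Drama" ∈ t ∧ "Action" ∈ t
  · rw [show aColl16 t = ["Drama"] by simp [aColl16, h16]]
    simp only [if_neg h1, if_neg h2, if_neg h3, if_neg h4, if_neg h5, if_neg h6, if_neg h7, if_neg h8, if_neg h9, if_neg h10, if_neg h11, if_neg h12, if_neg h13, if_neg h14, if_neg h15, if_pos (show "Drama" ∈ t ∧ ("Action" ∈ t ∨ "Adventure" ∈ t) from ⟨h16.1, Or.inl h16.2⟩)]
    decide
  rw [show aColl16 t = t by simp [aColl16, h16]]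
  by_cases h17 : "Drama" ∈ t ∧ "Adventure" ∈ t
  · rw [show aColl17 t = ["Drama"] by simp [aColl17, h17]]
    simp only [if_neg h1, if_neg h2, if_neg h3, if_neg h4, if_neg h5, if_neg h6, if_neg h7, if_neg h8, if_neg h9, if_neg h10, if_neg h11, if_neg h12, if_neg h13, if_neg h14, if_neg h15, if_pos (show "Drama" ∈ t ∧ ("Action" ∈ t ∨ "Adventure" ∈ t) from ⟨h17.1, Or.inr h17.2⟩)]
    decide
  rw [show aColl17 t = t by simp [aColl17, h17]]
  -- fallback branch: no collapse rule fires on either side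
  have hB : ¬ ("Drama" ∈ t ∧ ("Action" ∈ t ∨ "Adventure" ∈ t)) := by
    rintro ⟨hd, ha | hv⟩
    · exact h16 ⟨hd, ha⟩
    · exact h17 ⟨hd, hv⟩
  simp only [if_neg h1, if_neg h2, if_neg h3, if_neg h4, if_neg h5, if_neg h6, if_neg h7,
    if_neg h8, if_neg h9, if_neg h10, if_neg h11, if_neg h12, if_neg h13, if_neg h14,
    if_neg h15, if_neg hB]
  rw [remFold t]
  -- no Thriller remains after the removals, so A's final Thriller pass is identity
  have p1 : "Thriller" ∉ aSub1 t := by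
    rw [aSub1_eq]; split_ifs
    · exact not_mem_erase_of_not_mem _ _ _ h11
    · exact h11
  have p2 : "Thriller" ∉ aSub2 (aSub1 t) := by
    rw [aSub2_eq]; split_ifs
    · exact not_mem_erase_of_not_mem _ _ _ p1
    · exact p1
  have p3 : "Thriller" ∉ aSub3 (aSub2 (aSub1 t)) := by
    rw [aSub3_eq]; split_ifs
    · exact not_mem_erase_of_not_mem _ _ _ p2
    · exact p2
  have p4 : "Thriller" ∉ aSub4 (aSub3 (aSub2 (aSub1 t))) := by
    rw [aSub4_eq]; split_ifs
    · exact not_mem_erase_of_not_mem _ _ _ p3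
    · exact p3
  generalize hu : aSub4 (aSub3 (aSub2 (aSub1 t))) = u at p4
  have hfin : ∀ w : List String, "Thriller" ∉ w → aFin w = w := by
    intro w hw
    unfold aFin
    split_ifs <;> rfl
  by_cases hp : u.length = 2 ∧ u.getD 1 "" = "Action"
  · -- pop fires: eraseIdx 1 on a 2-element list = dropLast
    have h2 : aPop u = u.eraseIdx 1 := by
      unfold aPop; rw [if_pos hp.1, if_pos hp.2]
    have hdl : u.eraseIdx 1 = u.dropLast := by
      match u, hp.1 with
      | [a, b], _ => rfl
    rw [h2, if_pos hp, hfin _ (not_mem_eraseIdx_of_not_mem _ _ _ p4), hdl]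
  · have h2 : aPop u = u := by
      unfold aPop
      split_ifs with hl ha
      · exact absurd ⟨hl, ha⟩ hp
      all_goals rfl
    rw [h2, if_neg hp, hfin _ p4]

-- map fusion at the list level
theorem class_handler_eq (l : List (List String)) : class_handler l = class_handler_alt l := by
  simp only [class_handler, class_handler_alt, List.map_map, Function.comp_def]
  refine List.map_congr_left (fun g _ => ?_)
  rw [pvNorm_eq g, bClassify_eq g]
  exact core_eq _

-- ===== VERDICT (by name: the statement is the Claim_ definition above) =====
theorem class_handler_spec : Claim_equal_class_handler := by
  intro base_class _
  unfold Spec_class_handler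
  exact class_handler_eq base_class
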